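-- pv_equiv track=rewrite | github.com/Raha-R8/Threes_game | part4.py | count_zero_down
-- ===== SOURCE A (Python) =====
-- def count_zero_down(mat,k1,d1):
--     unchanged_mat = mat
--     count = -1
--     count_index = -1
--     dc ={}
--     for i in mat[0]:
--         count_index+=1
--         if i==0:
--             count+=1
--             dc[count] = count_index
--     m = count+1
--     if m ==0:
--         return unchanged_mat
--     zero_num = k1%m
--     for j in dc.keys():
--         if j==zero_num:
--             change = dc[j]
--     mat[0][change]=d1
--     return mat
-- ===== SOURCE B (Python) =====
-- def _place(row, t, d):
--     # return a copy of row with its t-th zero (0-based) replaced by d,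
--     # by cutting the list at its first zero and recursing on the tail
--     i = row.index(0)
--     if t == 0:
--         return row[:i] + [d] + row[i+1:]
--     return row[:i+1] + _place(row[i+1:], t - 1, d)
--
-- def count_zero_down(mat, k1, d1):
--     row = mat[0]
--     m = row.count(0)
--     if m == 0:
--         return mat
--     mat[0] = _place(row, k1 % m, d1)
--     return mat
-- ===== Notes on version B (the rewrite author's own statement) =====
-- stated objective: alternative
-- what changed: Replaces A's enumerate-everything pass that builds a dict from zero-ordinal to index plus a second loop over the dict keys with a recursive divide-at-first-zero scheme: each step cuts the row at its first zero via row.index(0) and list slicing and recurses on the tail with t-1, rebuilding the row by concatenation.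
import Mathlib
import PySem

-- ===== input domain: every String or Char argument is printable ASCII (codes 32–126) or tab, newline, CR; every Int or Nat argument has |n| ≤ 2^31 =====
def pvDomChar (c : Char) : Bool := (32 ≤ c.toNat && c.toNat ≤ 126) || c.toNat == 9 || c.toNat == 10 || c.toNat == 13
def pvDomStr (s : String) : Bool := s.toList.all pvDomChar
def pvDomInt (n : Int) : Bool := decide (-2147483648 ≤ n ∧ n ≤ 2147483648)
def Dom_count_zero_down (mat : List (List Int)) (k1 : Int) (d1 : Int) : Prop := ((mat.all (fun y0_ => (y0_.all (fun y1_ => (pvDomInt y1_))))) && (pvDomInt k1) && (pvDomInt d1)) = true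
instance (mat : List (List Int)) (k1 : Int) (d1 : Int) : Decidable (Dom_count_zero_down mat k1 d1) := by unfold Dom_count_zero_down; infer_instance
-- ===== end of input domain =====

-- B replaces A's dict-building enumeration + key-scan by a recursive divide-at-first-zero
-- scheme (index(0) + slicing + concatenation), an alternative decomposition; A mutates mat's
-- first row in place while B rebinds mat[0] to a fresh list — the equivalence proved here is
-- about the RETURN value.

-- ===== PORT A =====
def count_zero_down (mat : List (List Int)) (k1 : Int) (d1 : Int) : List (List Int) :=
  match mat with
  | [] => []          -- mat[0] raises IndexError here; excluded by Pre_
  | row :: rest =>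
    -- count = -1; count_index = -1; dc = {}; for i in mat[0]: ...
    let st := row.foldl
      (fun (s : Int × Int × PySem.Dict Int Int) i =>
        let ci := s.2.1 + 1
        if i = 0 then (s.1 + 1, ci, s.2.2.insert (s.1 + 1) ci) else (s.1, ci, s.2.2))
      (-1, -1, PySem.Dict.empty)
    let m := st.1 + 1
    if m = 0 then row :: rest
    else
      let zero_num := PySem.Int.mod k1 m
      -- for j in dc.keys(): if j == zero_num: change = dc[j]
      let change := st.2.2.keys.foldl
        (fun acc j => if j = zero_num then st.2.2.get? j else acc) (none : Option Int)
      match change with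
      | none => row :: rest     -- Python NameError: unreachable, zero_num is always a key
      | some chg => PySem.List.pySetD row chg d1 :: rest   -- mat[0][change] = d1 (always in range)

-- ===== PORT B =====
-- _place(row, t, d): cut at the first zero (row.index(0)), replace it if t == 0,
-- else keep the prefix through that zero and recurse on the tail with t-1
def pvPlace (row : List Int) (t : Int) (d : Int) : List Int :=
  match h : PySem.List.index? row 0 with
  | none => row     -- Python ValueError from row.index(0); unreachable: callers pass t < number of zeros
  | some i =>
    if t = 0 then
      PySem.List.slice row none (some (i : Int)) ++ [d]
        ++ PySem.List.slice row (some ((i : Int) + 1)) none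
    else
      PySem.List.slice row none (some ((i : Int) + 1))
        ++ pvPlace (PySem.List.slice row (some ((i : Int) + 1)) none) (t - 1) d
termination_by row.length
decreasing_by
  have hmem : (0 : Int) ∈ row := by
    have := PySem.List.index?_isSome_iff (xs := row) (v := (0 : Int))
    rw [h] at this; simpa using this
  have hne : row ≠ [] := by rintro rfl; simp at hmem
  rw [show ((i : Int) + 1) = (((i + 1 : Nat) : Int)) by push_cast; ring,
    PySem.List.slice_from_natCast]
  have : 0 < row.length := List.length_pos_iff.mpr hne
  simp [List.length_drop]; omega

def count_zero_down_alt (mat : List (List Int)) (k1 : Int) (d1 : Int) : List (List Int) :=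
  match mat with
  | [] => []          -- mat[0] raises IndexError here; excluded by Pre_
  | row :: rest =>
    let m : Int := (PySem.List.count row 0 : Int)
    if m = 0 then row :: rest
    else pvPlace row (PySem.Int.mod k1 m) d1 :: rest

-- ===== PRECONDITION & SPEC =====
-- Both programs raise IndexError on mat[0] when mat is empty; nothing else raises.
def Pre_count_zero_down (mat : List (List Int)) (k1 : Int) (d1 : Int) : Prop := mat ≠ []
instance (mat : List (List Int)) (k1 : Int) (d1 : Int) : Decidable (Pre_count_zero_down mat k1 d1) := by unfold Pre_count_zero_down; infer_instance
def pvWitness_count_zero_down : List (List Int) × Int × Int := ([[1, 0, 2, 0]], 3, 9)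
def Spec_count_zero_down (mat : List (List Int)) (k1 : Int) (d1 : Int) (out : List (List Int)) : Prop := out = count_zero_down_alt mat k1 d1
instance (mat : List (List Int)) (k1 : Int) (d1 : Int) (out : List (List Int)) : Decidable (Spec_count_zero_down mat k1 d1 out) := by unfold Spec_count_zero_down; infer_instance

-- ===== CLAIM (what is proved, stated in full; the proofs are below) =====
def Claim_equal_count_zero_down : Prop := ∀ (mat : List (List Int)) (k1 : Int) (d1 : Int), Dom_count_zero_down mat k1 d1 → Pre_count_zero_down mat k1 d1 → Spec_count_zero_down mat k1 d1 (count_zero_down mat k1 d1)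

-- ===== LEMMAS AND PROOFS =====

-- zero positions of a row, 0-based
def pvZPos : List Int → List Nat
  | [] => []
  | x :: xs => if x = 0 then 0 :: (pvZPos xs).map (· + 1) else (pvZPos xs).map (· + 1)

-- the (ordinal-key, index-value) pairs A's first loop inserts, starting from counters c, ci
def pvPairs : List Int → Int → Int → List (Int × Int)
  | [], _, _ => []
  | x :: xs, c, ci =>
    if x = 0 then (c + 1, ci + 1) :: pvPairs xs (c + 1) (ci + 1) else pvPairs xs c (ci + 1)

theorem pvZPos_length (row : List Int) : (pvZPos row).length = row.count 0 := by
  induction row with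
  | nil => simp [pvZPos]
  | cons x xs ih =>
    by_cases h : x = 0 <;> simp [pvZPos, h, ih]

theorem pvFold_char (row : List Int) : ∀ (c ci : Int) (d : PySem.Dict Int Int),
    (∀ k ∈ d.keys, k ≤ c) →
    row.foldl
      (fun (s : Int × Int × PySem.Dict Int Int) i =>
        let ci' := s.2.1 + 1
        if i = 0 then (s.1 + 1, ci', s.2.2.insert (s.1 + 1) ci') else (s.1, ci', s.2.2))
      (c, ci, d)
      = (c + row.count 0, ci + row.length, PySem.Dict.mk (d.items ++ pvPairs row c ci)) := by
  induction row with
  | nil => intro c ci d hd; cases d; simp [pvPairs]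
  | cons x xs ih =>
    intro c ci d hd
    by_cases hx : x = 0
    · subst hx
      have hnc : d.contains (c + 1) = false := by
        rw [PySem.Dict.contains_eq_decide_mem_keys]
        simp only [decide_eq_false_iff_not]
        intro hmem; have := hd _ hmem; omega
      have hkeys := PySem.Dict.keys_insert_of_not_contains (d := d) (k := c + 1) (v := ci + 1) hnc
      have hbound : ∀ k ∈ (d.insert (c + 1) (ci + 1)).keys, k ≤ c + 1 := by
        rw [hkeys]; intro k hk
        rcases List.mem_append.1 hk with h | h
        · exact le_trans (hd k h) (by omega)
        · simp at h; omega
      simp only [List.foldl_cons, reduceIte]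
      rw [ih (c + 1) (ci + 1) _ hbound,
        PySem.Dict.items_insert_of_not_contains (d := d) (k := c + 1) (v := ci + 1) hnc]
      simp only [pvPairs, reduceIte, List.count_cons, List.length_cons, List.append_assoc,
        List.cons_append, List.nil_append, Prod.mk.injEq]
      refine ⟨by simp; omega, by push_cast; ring, trivial⟩
    · have hbound : ∀ k ∈ d.keys, k ≤ c := hd
      simp only [List.foldl_cons, if_neg hx]
      rw [ih c (ci + 1) d hbound]
      simp only [pvPairs, if_neg hx, List.count_cons, List.length_cons, Prod.mk.injEq]
      refine ⟨by simp [hx], by push_cast; ring, trivial⟩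

theorem pvPairs_get? (row : List Int) : ∀ (c ci : Int) (t : Nat), t < row.count 0 →
    (PySem.Dict.mk (pvPairs row c ci)).get? (c + 1 + (t : Int))
      = some (ci + 1 + ((pvZPos row).getD t 0 : Int)) := by
  induction row with
  | nil => intro c ci t ht; simp [List.count_nil] at ht
  | cons x xs ih =>
    intro c ci t ht
    by_cases hx : x = 0
    · subst hx
      cases t with
      | zero =>
        simp [pvPairs, pvZPos, PySem.Dict.get?_mk_cons]
      | succ t' =>
        have htl : t' < xs.count 0 := by simp [List.count_cons] at ht; omega
        have hlen : t' < (pvZPos xs).length := by rw [pvZPos_length]; exact htl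
        rw [show pvPairs ((0 : Int) :: xs) c ci = (c + 1, ci + 1) :: pvPairs xs (c + 1) (ci + 1)
            from by simp [pvPairs],
          show pvZPos ((0 : Int) :: xs) = 0 :: (pvZPos xs).map (· + 1) from by simp [pvZPos],
          PySem.Dict.get?_mk_cons]
        have hne : ((c + 1 == c + 1 + ((t' : Nat) + 1 : Nat)) = false) := by
          simp; push_cast; omega
        rw [hne]
        simp only [Bool.false_eq_true, if_false, Nat.cast_add, Nat.cast_one]
        have heq : c + 1 + ((t' : Int) + 1) = (c + 1) + 1 + (t' : Int) := by ring
        rw [heq, ih (c + 1) (ci + 1) t' htl]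
        have : ((0 : Nat) :: (pvZPos xs).map (· + 1)).getD (t' + 1) 0
            = (pvZPos xs).getD t' 0 + 1 := by
          simp [List.getD_eq_getElem?_getD, List.getElem?_map, List.getElem?_eq_getElem hlen]
        rw [this]; push_cast; ring_nf
    · have htl : t < xs.count 0 := by simpa [List.count_cons, hx] using ht
      have hlen : t < (pvZPos xs).length := by rw [pvZPos_length]; exact htl
      simp only [pvPairs, if_neg hx, pvZPos]
      rw [ih c (ci + 1) t htl]
      have : ((pvZPos xs).map (· + 1)).getD t 0 = (pvZPos xs).getD t 0 + 1 := by
        simp [List.getD_eq_getElem?_getD, List.getElem?_map, List.getElem?_eq_getElem hlen]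
      rw [this]; push_cast; ring_nf

theorem pvPairs_key_mem (row : List Int) : ∀ (c ci z : Int), c < z → z ≤ c + row.count 0 →
    z ∈ (pvPairs row c ci).map Prod.fst := by
  induction row with
  | nil => intro c ci z h1 h2; simp at *; omega
  | cons x xs ih =>
    intro c ci z h1 h2
    by_cases hx : x = 0
    · simp only [pvPairs, if_pos hx, List.map_cons, List.mem_cons]
      by_cases hz : z = c + 1
      · exact Or.inl hz
      · refine Or.inr (ih (c + 1) (ci + 1) z (by omega) ?_)
        simp [hx, List.count_cons] at h2 ⊢; omega
    · simp only [pvPairs, if_neg hx]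
      refine ih c (ci + 1) z h1 ?_
      simpa [List.count_cons, hx] using h2

theorem pvKeyLoop (dc : PySem.Dict Int Int) (z : Int) (ks : List Int) :
    ∀ (acc : Option Int),
    ks.foldl (fun a j => if j = z then dc.get? j else a) acc
      = if z ∈ ks then dc.get? z else acc := by
  induction ks with
  | nil => intro acc; simp
  | cons j js ih =>
    intro acc
    by_cases h : j = z
    · subst h; simp [List.foldl_cons, ih]
    · have hz : ¬ z = j := fun e => h e.symm
      simp [List.foldl_cons, h, ih, hz]

-- B-side: one-step unfoldings of pvPlace
theorem pvPlace_eq_none (row : List Int) (t d : Int)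
    (h : PySem.List.index? row 0 = none) : pvPlace row t d = row := by
  rw [pvPlace]
  split
  · rfl
  · next i h' => rw [h] at h'; exact absurd h' (by simp)

theorem pvPlace_eq_some (row : List Int) (t d : Int) (i : Nat)
    (h : PySem.List.index? row 0 = some i) :
    pvPlace row t d =
      if t = 0 then
        PySem.List.slice row none (some (i : Int)) ++ [d]
          ++ PySem.List.slice row (some ((i : Int) + 1)) none
      else
        PySem.List.slice row none (some ((i : Int) + 1))
          ++ pvPlace (PySem.List.slice row (some ((i : Int) + 1)) none) (t - 1) d := by
  rw [pvPlace]
  split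
  · next h' => rw [h] at h'; exact absurd h' (by simp)
  · next i' h' =>
    rw [h] at h'
    have : i' = i := by simpa using h'.symm
    subst this; rfl

theorem pvPlace_cons_zero (xs : List Int) (t d : Int) :
    pvPlace (0 :: xs) t d = if t = 0 then d :: xs else 0 :: pvPlace xs (t - 1) d := by
  rw [pvPlace_eq_some (0 :: xs) t d 0 (PySem.List.index?_cons_self 0 xs)]
  by_cases ht : t = 0
  · rw [if_pos ht, if_pos ht, PySem.List.slice_to_natCast,
      show ((0 : Nat) : Int) + 1 = ((1 : Nat) : Int) by norm_num,
      PySem.List.slice_from_natCast]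
    simp
  · rw [if_neg ht, if_neg ht,
      show ((0 : Nat) : Int) + 1 = ((1 : Nat) : Int) by norm_num,
      PySem.List.slice_to_natCast, PySem.List.slice_from_natCast]
    simp

theorem pvPlace_cons_ne (x : Int) (xs : List Int) (t d : Int) (hx : x ≠ 0) :
    pvPlace (x :: xs) t d = x :: pvPlace xs t d := by
  have h0 : PySem.List.index? (x :: xs) 0 = (PySem.List.index? xs 0).map (· + 1) :=
    PySem.List.index?_cons_of_ne xs hx
  cases hi : PySem.List.index? xs 0 with
  | none =>
    rw [pvPlace_eq_none (x :: xs) t d (by rw [h0, hi]; rfl), pvPlace_eq_none xs t d hi]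
  | some i =>
    rw [pvPlace_eq_some (x :: xs) t d (i + 1) (by rw [h0, hi]; rfl),
      pvPlace_eq_some xs t d i hi]
    have e1 : (((i + 1 : Nat)) : Int) = ((i : Nat) : Int) + 1 := by push_cast; ring
    have e2 : (((i + 1 : Nat)) : Int) + 1 = (((i + 2 : Nat)) : Int) := by push_cast; ring
    by_cases ht : t = 0
    · rw [if_pos ht, if_pos ht, e1.symm, e2,
        PySem.List.slice_to_natCast, PySem.List.slice_to_natCast,
        PySem.List.slice_from_natCast, PySem.List.slice_from_natCast]
      simp [List.take_succ_cons, List.drop_succ_cons]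
    · rw [if_neg ht, if_neg ht, e1.symm, e2,
        PySem.List.slice_to_natCast, PySem.List.slice_to_natCast,
        PySem.List.slice_from_natCast, PySem.List.slice_from_natCast]
      simp [List.take_succ_cons, List.drop_succ_cons]

theorem pvPlace_char (row : List Int) : ∀ (t : Nat) (d : Int), t < row.count 0 →
    pvPlace row (t : Int) d = row.set ((pvZPos row).getD t 0) d := by
  induction row with
  | nil => intro t d ht; simp [List.count_nil] at ht
  | cons x xs ih =>
    intro t d ht
    by_cases hx : x = 0
    · subst hx
      cases t with
      | zero => simp [pvPlace_cons_zero, pvZPos]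
      | succ t' =>
        have htl : t' < xs.count 0 := by simp [List.count_cons] at ht; omega
        have hlen : t' < (pvZPos xs).length := by rw [pvZPos_length]; exact htl
        rw [pvPlace_cons_zero, if_neg (by push_cast; omega)]
        rw [show (((t' + 1 : Nat)) : Int) - 1 = ((t' : Nat) : Int) by push_cast; ring,
          ih t' d htl]
        simp only [pvZPos, reduceIte]
        have : ((0 : Nat) :: (pvZPos xs).map (· + 1)).getD (t' + 1) 0
            = (pvZPos xs).getD t' 0 + 1 := by
          simp [List.getD_eq_getElem?_getD, List.getElem?_map, List.getElem?_eq_getElem hlen]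
        rw [this, List.set_cons_succ]
    · have htl : t < xs.count 0 := by simpa [List.count_cons, hx] using ht
      have hlen : t < (pvZPos xs).length := by rw [pvZPos_length]; exact htl
      rw [pvPlace_cons_ne x xs _ d hx, ih t d htl]
      simp only [pvZPos, if_neg hx]
      have : ((pvZPos xs).map (· + 1)).getD t 0 = (pvZPos xs).getD t 0 + 1 := by
        simp [List.getD_eq_getElem?_getD, List.getElem?_map, List.getElem?_eq_getElem hlen]
      rw [this, List.set_cons_succ]

-- ===== VERDICT (by name: the statement is the Claim_ definition above) =====
theorem count_zero_down_spec : Claim_equal_count_zero_down := by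
  intro mat k1 d1 _ hpre
  unfold Spec_count_zero_down
  match mat with
  | [] => exact absurd rfl hpre
  | row :: rest =>
    simp only [count_zero_down, count_zero_down_alt]
    have hkeys0 : ∀ k ∈ (PySem.Dict.empty : PySem.Dict Int Int).keys, k ≤ (-1 : Int) := by
      simp [PySem.Dict.keys_empty]
    rw [pvFold_char row (-1) (-1) _ hkeys0]
    by_cases hc : row.count 0 = 0
    · simp [hc, PySem.List.count]
    · have hcpos : (0 : Int) < (row.count 0 : Int) := by exact_mod_cast Nat.pos_of_ne_zero hc
      have hm : (-1 : Int) + (row.count 0 : Int) + 1 = (row.count 0 : Int) := by ring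
      rw [hm]
      have hcount : (PySem.List.count row (0 : Int) : Int) = (row.count 0 : Int) := by
        simp [PySem.List.count]
      have hne : ((row.count 0 : Int) = 0) = False := by simp; omega
      simp only [hcount, hne, if_false]
      have hz0 : 0 ≤ PySem.Int.mod k1 (row.count 0 : Int) := PySem.Int.mod_nonneg _ hcpos
      have hzlt : PySem.Int.mod k1 (row.count 0 : Int) < (row.count 0 : Int) :=
        PySem.Int.mod_lt _ hcpos
      have hzt : ((PySem.Int.mod k1 (row.count 0 : Int)).toNat : Int)
          = PySem.Int.mod k1 (row.count 0 : Int) := Int.toNat_of_nonneg hz0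
      have htlt : (PySem.Int.mod k1 (row.count 0 : Int)).toNat < row.count 0 := by omega
      have hmem : PySem.Int.mod k1 (row.count 0 : Int)
          ∈ (pvPairs row (-1) (-1)).map Prod.fst :=
        pvPairs_key_mem row (-1) (-1) _ (by omega) (by omega)
      have hg := pvPairs_get? row (-1) (-1) _ htlt
      rw [hzt] at hg
      have hg' : (PySem.Dict.mk (pvPairs row (-1) (-1))).get?
            (PySem.Int.mod k1 (row.count 0 : Int))
          = some (((pvZPos row).getD (PySem.Int.mod k1 (row.count 0 : Int)).toNat 0 : Int)) := by
        rw [show PySem.Int.mod k1 (row.count 0 : Int)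
            = -1 + 1 + PySem.Int.mod k1 (row.count 0 : Int) from by ring, hg]
        norm_num
      have hset := pvPlace_char row (PySem.Int.mod k1 (row.count 0 : Int)).toNat d1 htlt
      rw [hzt] at hset
      have hemp : PySem.Dict.empty.items = ([] : List (Int × Int)) := rfl
      simp only [List.nil_append, PySem.Dict.keys_mk, pvKeyLoop, hemp]
      rw [if_pos (by simpa using hmem), hg', hset]
      simp
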